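-- pv_equiv track=rewrite | github.com/MissMuffin/music_language_model | util_midi.py | modify_chord_rests
-- ===== SOURCE A (Python) =====
-- def modify_chord_rests(chords_string):
--     # change rests
--     chords_string_replaced = chords_string.replace("2", "0")
--     single_rest = "abcdefghijklmnopqrstuvwxyzABCDEFGHIJKLMNOPQRSTUVWXYZ"
--     chords = chords_string_replaced.split(" ")
--     noterange = len(chords[0]) - 1
--     i = 0
--     while i < len(chords):
--         j = 1
--         if chords[i][1:] == "0" * noterange:
--             num_prev_notes = 0
--             for j in range(-10, 0):
--                 if i + j >= 0:
--                     if chords[i + j] == "":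
--                         continue
--                     for c in chords[i + j][1:]:
--                         if c == "1":
--                             num_prev_notes += 1
--             num_prev_notes = min(num_prev_notes, len(single_rest) - 1)
--             chords[i] = chords[i][0] + single_rest[num_prev_notes] * noterange
--         i = i + 1
--     return " ".join(chords)
-- ===== SOURCE B (Python) =====
-- def modify_chord_rests(chords_string):
--     # One pass: precompute per-chord '1'-counts once, then keep a running
--     # 10-chord window sum instead of rescanning the previous 10 chords at
--     # every rest chord.  (A mutates its list in place; rest chords contain
--     # no '1', so the precomputed counts stay valid for the whole pass.)
--     replaced = chords_string.replace("2", "0")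
--     single_rest = "abcdefghijklmnopqrstuvwxyzABCDEFGHIJKLMNOPQRSTUVWXYZ"
--     chords = replaced.split(" ")
--     noterange = len(chords[0]) - 1
--     rest_tail = "0" * noterange
--     ones = [sum(c == "1" for c in chord[1:]) for chord in chords]
--     out = []
--     w = 0
--     for i in range(len(chords)):
--         if i >= 1:
--             w += ones[i - 1]
--         if i >= 11:
--             w -= ones[i - 11]
--         ch = chords[i]
--         if ch[1:] == rest_tail:
--             num_prev_notes = min(w, len(single_rest) - 1)
--             out.append(ch[0] + single_rest[num_prev_notes] * noterange)
--         else: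
--             out.append(ch)
--     return " ".join(out)
-- ===== Notes on version B (the rewrite author's own statement) =====
-- stated objective: faster
-- what changed: B precomputes each chord's '1'-count once and maintains a running 10-chord window sum while building a fresh output list, instead of A's in-place mutation with a rescan of the previous 10 chords' characters at every rest chord.
import Mathlib
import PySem

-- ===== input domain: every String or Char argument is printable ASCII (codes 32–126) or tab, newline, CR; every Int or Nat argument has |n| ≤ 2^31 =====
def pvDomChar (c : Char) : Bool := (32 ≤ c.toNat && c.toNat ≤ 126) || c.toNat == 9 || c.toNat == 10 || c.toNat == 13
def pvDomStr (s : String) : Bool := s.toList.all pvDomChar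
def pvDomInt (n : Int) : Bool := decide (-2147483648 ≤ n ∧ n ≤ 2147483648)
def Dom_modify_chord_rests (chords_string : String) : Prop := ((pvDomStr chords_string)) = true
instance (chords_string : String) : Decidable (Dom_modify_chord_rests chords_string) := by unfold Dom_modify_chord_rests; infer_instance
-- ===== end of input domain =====

-- B replaces A's per-rest rescan of the previous 10 chords by a precomputed '1'-count table
-- and a running window sum, building a fresh output list instead of mutating in place.

-- ===== PORT A =====
def pvSingleRest : List Char :=
  "abcdefghijklmnopqrstuvwxyzABCDEFGHIJKLMNOPQRSTUVWXYZ".toList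

-- the inner 'for c in chords[i+j][1:]: if c == "1": num_prev_notes += 1' loop
def pvCountTail (s : String) (acc : Nat) : Nat :=
  (PySem.List.slice s.toList (some 1) none).foldl (fun a c => if c == '1' then a + 1 else a) acc

-- the 'for j in range(-10, 0)' loop of A
def pvWindowA (chords : List String) (i : Nat) : Nat :=
  (PySem.List.pyRange (-10) 0 1).foldl
    (fun acc j =>
      if (i : Int) + j ≥ 0 then
        match PySem.List.pyGet? chords ((i : Int) + j) with
        | some s => if s == "" then acc else pvCountTail s acc
        | none => acc
      else acc) 0

-- chords[i][0] + single_rest[n] * noterange  (chords[i][0] is in range on Pre_-admitted runs)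
def pvRewriteA (s : String) (noterange : Int) (n : Nat) : String :=
  String.ofList (((PySem.List.pyGet? s.toList 0).getD ' ') ::
    List.replicate noterange.toNat (pvSingleRest.getD n ' '))

def pvLoopA (noterange : Int) (chords : List String) (i : Nat) : List String :=
  if h : i < chords.length then
    if PySem.List.slice chords[i].toList (some 1) none = List.replicate noterange.toNat '0' then
      pvLoopA noterange
        (chords.set i (pvRewriteA chords[i] noterange
          (min (pvWindowA chords i) (pvSingleRest.length - 1)))) (i + 1)
    else
      pvLoopA noterange chords (i + 1)
  else chords
termination_by chords.length - i
decreasing_by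
  · simp [List.length_set]; omega
  · omega

def modify_chord_rests (chords_string : String) : String :=
  let replaced := PySem.Str.replace chords_string "2" "0"
  let chords := (PySem.Str.split? replaced " ").getD []
  let noterange : Int := (((PySem.List.pyGet? chords 0).getD "").toList.length : Int) - 1
  PySem.Str.join " " (pvLoopA noterange chords 0)

-- ===== PORT B =====
-- ones[i] = sum(c == "1" for c in chords[i][1:]), computed once
def pvOnes (s : String) : Nat :=
  (PySem.List.slice s.toList (some 1) none).foldl (fun a c => a + (if c == '1' then 1 else 0)) 0

def pvLoopB (noterange : Int) (restTail : List Char) (ones : List Nat) (chords : List String)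
    (i : Nat) (w : Int) (out : List String) : List String :=
  if h : i < chords.length then
    let w1 := if 1 ≤ i then w + PySem.List.pyGetD ones ((i : Int) - 1) 0 else w
    let w2 := if 11 ≤ i then w1 - PySem.List.pyGetD ones ((i : Int) - 11) 0 else w1
    let ch := chords[i]
    if PySem.List.slice ch.toList (some 1) none = restTail then
      pvLoopB noterange restTail ones chords (i + 1) w2
        (out ++ [String.ofList (((PySem.List.pyGet? ch.toList 0).getD ' ') ::
          List.replicate noterange.toNat
            ((PySem.List.pyGet? pvSingleRest (min w2 ((pvSingleRest.length : Int) - 1))).getD ' '))])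
    else
      pvLoopB noterange restTail ones chords (i + 1) w2 (out ++ [ch])
  else out
termination_by chords.length - i

def modify_chord_rests_alt (chords_string : String) : String :=
  let replaced := PySem.Str.replace chords_string "2" "0"
  let chords := (PySem.Str.split? replaced " ").getD []
  let noterange : Int := (((PySem.List.pyGet? chords 0).getD "").toList.length : Int) - 1
  let restTail := List.replicate noterange.toNat '0'
  let ones := chords.map pvOnes
  PySem.Str.join " " (pvLoopB noterange restTail ones chords 0 0 [])

-- ===== PRECONDITION & SPEC =====
-- Pre_ excludes exactly the inputs where A raises IndexError (chords[i][0] on an empty chord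
-- that passes the all-zero rest test, possible only when the first chord has length ≤ 1);
-- B raises there too.
def Pre_modify_chord_rests (chords_string : String) : Prop :=
  ¬ ((((((PySem.Str.split? chords_string " ").getD [])).headD "").toList.length ≤ 1) ∧
      "" ∈ ((PySem.Str.split? chords_string " ").getD []))
instance (chords_string : String) : Decidable (Pre_modify_chord_rests chords_string) := by
  unfold Pre_modify_chord_rests; infer_instance

def pvWitness_modify_chord_rests : String := "100 0110 0000 1010"

def Spec_modify_chord_rests (chords_string : String) (out : String) : Prop :=
  out = modify_chord_rests_alt chords_string
instance (chords_string : String) (out : String) : Decidable (Spec_modify_chord_rests chords_string out) := by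
  unfold Spec_modify_chord_rests; infer_instance

-- ===== CLAIM (what is proved, stated in full; the proofs are below) =====
def Claim_equal_modify_chord_rests : Prop := ∀ (chords_string : String), Dom_modify_chord_rests chords_string → Pre_modify_chord_rests chords_string → Spec_modify_chord_rests chords_string (modify_chord_rests chords_string)

-- ===== LEMMAS AND PROOFS =====

-- '1'-count of a chord's tail
def pvCnt (s : String) : Nat := (PySem.List.slice s.toList (some 1) none).count '1'

-- window sum of ones over positions max(0, i-10) .. i-1
def pvW (os : List Nat) (i : Nat) : Nat :=
  ((List.range' (i - 10) (min i 10)).map (fun p => os.getD p 0)).sum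

-- the common spec: the output list, position by position
def pvProc (noterange : Int) (chords : List String) (i : Nat) : List String :=
  if h : i < chords.length then
    (if PySem.List.slice chords[i].toList (some 1) none = List.replicate noterange.toNat '0' then
      pvRewriteA chords[i] noterange (min (pvW (chords.map pvOnes) i) (pvSingleRest.length - 1))
    else chords[i]) :: pvProc noterange chords (i + 1)
  else []
termination_by chords.length - i

-- B's per-iteration window update and new-element expression, named for the proofs
def pvW2 (os : List Nat) (i : Nat) (w : Int) : Int :=
  let w1 := if 1 ≤ i then w + PySem.List.pyGetD os ((i : Int) - 1) 0 else w
  if 11 ≤ i then w1 - PySem.List.pyGetD os ((i : Int) - 11) 0 else w1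

def pvNewB (s : String) (noterange : Int) (w2 : Int) : String :=
  String.ofList (((PySem.List.pyGet? s.toList 0).getD ' ') ::
    List.replicate noterange.toNat
      ((PySem.List.pyGet? pvSingleRest (min w2 ((pvSingleRest.length : Int) - 1))).getD ' '))

-- unfolding lemmas
lemma pvProc_pos (nt : Int) (xs : List String) (i : Nat) (h : i < xs.length) :
    pvProc nt xs i =
      (if PySem.List.slice (xs[i]'h).toList (some 1) none = List.replicate nt.toNat '0' then
        pvRewriteA (xs[i]'h) nt (min (pvW (xs.map pvOnes) i) (pvSingleRest.length - 1))
      else (xs[i]'h)) :: pvProc nt xs (i + 1) := by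
  rw [pvProc]; rw [dif_pos h]

lemma pvProc_neg (nt : Int) (xs : List String) (i : Nat) (h : ¬ i < xs.length) :
    pvProc nt xs i = [] := by
  rw [pvProc]; rw [dif_neg h]

lemma pvLoopA_pos_rest (nt : Int) (xs : List String) (i : Nat) (h : i < xs.length)
    (hr : PySem.List.slice (xs[i]'h).toList (some 1) none = List.replicate nt.toNat '0') :
    pvLoopA nt xs i =
      pvLoopA nt (xs.set i (pvRewriteA (xs[i]'h) nt
        (min (pvWindowA xs i) (pvSingleRest.length - 1)))) (i + 1) := by
  rw [pvLoopA]; rw [dif_pos h, if_pos hr]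

lemma pvLoopA_pos_norest (nt : Int) (xs : List String) (i : Nat) (h : i < xs.length)
    (hr : ¬ PySem.List.slice (xs[i]'h).toList (some 1) none = List.replicate nt.toNat '0') :
    pvLoopA nt xs i = pvLoopA nt xs (i + 1) := by
  rw [pvLoopA]; rw [dif_pos h, if_neg hr]

lemma pvLoopA_neg (nt : Int) (xs : List String) (i : Nat) (h : ¬ i < xs.length) :
    pvLoopA nt xs i = xs := by
  rw [pvLoopA]; rw [dif_neg h]

lemma pvLoopB_pos (nt : Int) (rt : List Char) (os : List Nat) (xs : List String)
    (i : Nat) (w : Int) (out : List String) (h : i < xs.length) :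
    pvLoopB nt rt os xs i w out =
      if PySem.List.slice (xs[i]'h).toList (some 1) none = rt then
        pvLoopB nt rt os xs (i + 1) (pvW2 os i w) (out ++ [pvNewB (xs[i]'h) nt (pvW2 os i w)])
      else
        pvLoopB nt rt os xs (i + 1) (pvW2 os i w) (out ++ [xs[i]'h]) := by
  rw [pvLoopB]; rw [dif_pos h]; simp only [pvW2, pvNewB]

lemma pvLoopB_neg (nt : Int) (rt : List Char) (os : List Nat) (xs : List String)
    (i : Nat) (w : Int) (out : List String) (h : ¬ i < xs.length) :
    pvLoopB nt rt os xs i w out = out := by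
  rw [pvLoopB]; rw [dif_neg h]

-- counting folds
lemma foldl_count_char (l : List Char) : ∀ acc : Nat,
    l.foldl (fun a xs => if xs == '1' then a + 1 else a) acc = acc + l.count '1' := by
  induction l with
  | nil => intro acc; simp
  | cons xs l ih =>
    intro acc
    simp only [List.foldl_cons, List.count_cons, ih]
    by_cases hc : xs = '1' <;> simp [hc] <;> omega

lemma foldl_add_ite_count (l : List Char) : ∀ acc : Nat,
    l.foldl (fun a xs => a + (if xs == '1' then 1 else 0)) acc = acc + l.count '1' := by
  induction l with
  | nil => intro acc; simp
  | cons xs l ih =>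
    intro acc
    simp only [List.foldl_cons, List.count_cons, ih]
    by_cases hc : xs = '1' <;> simp [hc] <;> omega

lemma pvCountTail_eq (s : String) (acc : Nat) : pvCountTail s acc = acc + pvCnt s := by
  unfold pvCountTail pvCnt; exact foldl_count_char _ acc

lemma pvOnes_eq (s : String) : pvOnes s = pvCnt s := by
  unfold pvOnes pvCnt
  simpa using foldl_add_ite_count (PySem.List.slice s.toList (some 1) none) 0

lemma pvOnes_empty : pvOnes "" = 0 := by decide

lemma getD_map_pvOnes (xs : List String) (p : Nat) (hp : p < xs.length) :
    (xs.map pvOnes).getD p 0 = pvOnes (xs[p]'hp) := by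
  rw [List.getD_eq_getElem?_getD, List.getElem?_map, List.getElem?_eq_getElem hp]
  rfl

lemma pvSingleRest_getD_ne (n : Nat) : pvSingleRest[n]?.getD ' ' ≠ '1' := by
  cases h : pvSingleRest[n]? with
  | none => decide
  | some x =>
    have hx : x ∈ pvSingleRest := List.mem_of_getElem? h
    have : '1' ∉ pvSingleRest := by decide
    simp only [Option.getD_some]
    intro hxe; exact this (hxe ▸ hx)

lemma pvOnes_rewrite (s : String) (nt : Int) (n : Nat) : pvOnes (pvRewriteA s nt n) = 0 := by
  rw [pvOnes_eq]
  unfold pvCnt pvRewriteA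
  rw [String.toList_ofList, PySem.List.slice_from_one]
  simp only [List.tail_cons, List.getD_eq_getElem?_getD]
  rw [List.count_eq_zero]
  intro hmem
  exact pvSingleRest_getD_ne n (List.eq_of_mem_replicate hmem).symm

lemma pvOnes_of_rest (s : String) (m : Nat)
    (hr : PySem.List.slice s.toList (some 1) none = List.replicate m '0') : pvOnes s = 0 := by
  rw [pvOnes_eq]; unfold pvCnt; rw [hr]; simp [List.count_replicate]

-- the window sum: step lemma and A's fold
lemma pvWk_step (os : List Nat) (i k : Nat) :
    ((List.range' (i - (k + 1)) (min i (k + 1))).map (fun p => os.getD p 0)).sum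
      = (if k + 1 ≤ i then os.getD (i - (k + 1)) 0 else 0)
        + ((List.range' (i - k) (min i k)).map (fun p => os.getD p 0)).sum := by
  by_cases hk : k + 1 ≤ i
  · have h1 : min i (k + 1) = k + 1 := by omega
    have h3 : i - (k + 1) + 1 = i - k := by omega
    have h2 : min i k = k := by omega
    rw [h1, h2, List.range'_succ, h3, if_pos hk]
    simp
  · have h1 : min i (k + 1) = min i k := by omega
    have h2 : i - (k + 1) = i - k := by omega
    rw [h1, h2, if_neg hk]; simp

lemma pvWinGen (chords : List String) (i : Nat) (hi : i ≤ chords.length) : ∀ (k : Nat) (acc : Nat),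
    (PySem.List.pyRange (-(k : Int)) 0 1).foldl
      (fun acc j =>
        if (i : Int) + j ≥ 0 then
          match PySem.List.pyGet? chords ((i : Int) + j) with
          | some s => if s == "" then acc else pvCountTail s acc
          | none => acc
        else acc) acc
    = acc + ((List.range' (i - k) (min i k)).map (fun p => (chords.map pvOnes).getD p 0)).sum := by
  intro k
  induction k with
  | zero => intro acc; simp [PySem.List.pyRange_one_eq_nil]
  | succ k ih =>
    intro acc
    have hcons : PySem.List.pyRange (-((k + 1 : Nat) : Int)) 0 1
        = (-((k + 1 : Nat) : Int)) :: PySem.List.pyRange (-((k : Nat) : Int)) 0 1 := by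
      rw [PySem.List.pyRange_one_cons (by push_cast; omega),
        show (-((k + 1 : Nat) : Int) + 1) = -((k : Nat) : Int) by push_cast; omega]
    rw [hcons, List.foldl_cons, ih]
    have hstep : (if (i : Int) + (-((k + 1 : Nat) : Int)) ≥ 0 then
          match PySem.List.pyGet? chords ((i : Int) + (-((k + 1 : Nat) : Int))) with
          | some s => if s == "" then acc else pvCountTail s acc
          | none => acc
        else acc)
        = acc + (if k + 1 ≤ i then (chords.map pvOnes).getD (i - (k + 1)) 0 else 0) := by
      by_cases hk : k + 1 ≤ i
      · rw [if_pos (by push_cast; omega), if_pos hk]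
        have hidx : (i : Int) + (-((k + 1 : Nat) : Int)) = ((i - (k + 1) : Nat) : Int) := by
          push_cast; omega
        have hlt : i - (k + 1) < chords.length := by omega
        rw [hidx, PySem.List.pyGet?_natCast, List.getElem?_eq_getElem hlt]
        rw [getD_map_pvOnes chords _ hlt]
        by_cases hs : chords[i - (k + 1)]'hlt = ""
        · simp only [hs]
          simp [pvOnes_empty]
        · rw [show (match some (chords[i - (k + 1)]'hlt) with
              | some s => if s == "" then acc else pvCountTail s acc
              | none => acc) = (if chords[i - (k + 1)]'hlt == "" then acc
                else pvCountTail (chords[i - (k + 1)]'hlt) acc) from rfl]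
          rw [if_neg (by simpa using hs), pvCountTail_eq, pvOnes_eq]
      · rw [if_neg (by push_cast; omega), if_neg hk]
        simp
    rw [hstep, pvWk_step]
    omega

lemma pvWindowA_eq (chords : List String) (i : Nat) (hi : i ≤ chords.length) :
    pvWindowA chords i = pvW (chords.map pvOnes) i := by
  unfold pvWindowA pvW
  rw [show ((-10 : Int)) = -((10 : Nat) : Int) by norm_num]
  rw [pvWinGen chords i hi 10 0]
  omega

-- list surgery
lemma take_succ_set (xs : List String) (i : Nat) (v : String) (h : i < xs.length) :
    (xs.set i v).take (i + 1) = xs.take i ++ [v] := by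
  rw [List.set_eq_take_append_cons_drop, if_pos h]
  have hlt : (xs.take i).length = i := by simp; omega
  rw [List.take_append, hlt]
  simp [List.take_take]

lemma set_map_pvOnes (xs : List String) (i : Nat) (v : String) (h : i < xs.length)
    (hv : pvOnes v = pvOnes (xs[i]'h)) : (xs.set i v).map pvOnes = xs.map pvOnes := by
  rw [List.map_set, hv]
  have h2 : i < (xs.map pvOnes).length := by simpa using h
  have he : pvOnes (xs[i]'h) = (xs.map pvOnes)[i]'h2 := by simp
  rw [he, List.set_getElem_self]

-- pvProc depends only on the suffix and the ones-table
lemma pvProc_congr (nt : Int) : ∀ (d i : Nat) (xs c' : List String),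
    xs.length - i = d → xs.length = c'.length →
    xs.map pvOnes = c'.map pvOnes →
    (∀ p, i ≤ p → xs[p]? = c'[p]?) →
    pvProc nt xs i = pvProc nt c' i := by
  intro d
  induction d with
  | zero =>
    intro i xs c' hd hlen _ _
    rw [pvProc_neg nt xs i (by omega), pvProc_neg nt c' i (by omega)]
  | succ d ih =>
    intro i xs c' hd hlen hmap hget
    have h : i < xs.length := by omega
    have h' : i < c'.length := by omega
    have he : xs[i] = c'[i] := by
      have := hget i le_rfl
      rw [List.getElem?_eq_getElem h, List.getElem?_eq_getElem h'] at this
      exact Option.some.inj this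
    rw [pvProc_pos nt xs i h, pvProc_pos nt c' i h', he, hmap,
      ih (i + 1) xs c' (by omega) hlen hmap (fun p hp => hget p (by omega))]

-- A's loop computes pvProc
lemma pvLoopA_eq (nt : Int) : ∀ (d i : Nat) (xs : List String),
    xs.length - i = d →
    pvLoopA nt xs i = xs.take i ++ pvProc nt xs i := by
  intro d
  induction d with
  | zero =>
    intro i xs hd
    rw [pvLoopA_neg nt xs i (by omega), pvProc_neg nt xs i (by omega),
      List.take_of_length_le (by omega), List.append_nil]
  | succ d ih =>
    intro i xs hd
    have h : i < xs.length := by omega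
    by_cases hr : PySem.List.slice (xs[i]'h).toList (some 1) none = List.replicate nt.toNat '0'
    · rw [pvLoopA_pos_rest nt xs i h hr]
      set v := pvRewriteA (xs[i]'h) nt (min (pvWindowA xs i) (pvSingleRest.length - 1)) with hv
      rw [ih (i + 1) (xs.set i v) (by simp [List.length_set]; omega)]
      have hvones : pvOnes v = pvOnes (xs[i]'h) := by
        rw [hv, pvOnes_rewrite]
        exact (pvOnes_of_rest (xs[i]'h) nt.toNat hr).symm
      rw [take_succ_set xs i v h]
      rw [pvProc_congr nt (xs.length - (i + 1)) (i + 1) (xs.set i v) xs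
        (by simp [List.length_set]) (by simp) (set_map_pvOnes xs i v h hvones)
        (fun p hp => List.getElem?_set_ne (by omega))]
      rw [pvProc_pos nt xs i h, if_pos hr]
      have helem : pvRewriteA (xs[i]'h) nt (min (pvW (xs.map pvOnes) i) (pvSingleRest.length - 1)) = v := by
        rw [hv, pvWindowA_eq xs i h.le]
      rw [helem]
      simp only [List.append_assoc, List.singleton_append]
    · rw [pvLoopA_pos_norest nt xs i h hr, ih (i + 1) xs (by omega),
        pvProc_pos nt xs i h, if_neg hr]
      rw [List.take_add_one, List.getElem?_eq_getElem h]
      simp only [Option.toList_some, List.append_assoc, List.singleton_append]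

-- the running window update is the window sum
lemma pvW_zero (os : List Nat) : pvW os 0 = 0 := by simp [pvW]

lemma pvW_succ_small (os : List Nat) (i : Nat) (h1 : 1 ≤ i) (h2 : i < 11) :
    pvW os i = pvW os (i - 1) + os.getD (i - 1) 0 := by
  unfold pvW
  have ha : min i 10 = i := by omega
  have hb : min (i - 1) 10 = i - 1 := by omega
  have hc : i - 10 = 0 := by omega
  have hd : i - 1 - 10 = 0 := by omega
  rw [ha, hb, hc, hd]
  rw [show i = (i - 1) + 1 by omega, List.range'_concat]
  simp only [List.map_append, List.map_cons, List.map_nil, List.sum_append, List.sum_cons,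
    List.sum_nil, Nat.zero_add, Nat.one_mul, Nat.add_zero, Nat.add_sub_cancel]

lemma pvW_succ_big (os : List Nat) (i : Nat) (h : 11 ≤ i) :
    pvW os i + os.getD (i - 11) 0 = pvW os (i - 1) + os.getD (i - 1) 0 := by
  unfold pvW
  have ha : min i 10 = 10 := by omega
  have hb : min (i - 1) 10 = 10 := by omega
  rw [ha, hb]
  have e1 : List.range' (i - 11) 11 = (i - 11) :: List.range' (i - 10) 10 := by
    rw [show (11 : Nat) = 10 + 1 from rfl, List.range'_succ,
      show i - 11 + 1 = i - 10 by omega]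
  have e2 : List.range' (i - 11) (10 + 1) = List.range' (i - 11) 10 ++ [i - 1] := by
    rw [List.range'_concat, show i - 11 + 1 * 10 = i - 1 by omega]
  have e3 : i - 1 - 10 = i - 11 := by omega
  have s1 : ((List.range' (i - 11) 11).map (fun p => os.getD p 0)).sum
      = os.getD (i - 11) 0 + ((List.range' (i - 10) 10).map (fun p => os.getD p 0)).sum := by
    rw [e1]; simp only [List.map_cons, List.sum_cons]
  have s2 : ((List.range' (i - 11) 11).map (fun p => os.getD p 0)).sum
      = ((List.range' (i - 11) 10).map (fun p => os.getD p 0)).sum + os.getD (i - 1) 0 := by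
    rw [show (11 : Nat) = 10 + 1 from rfl, e2]
    simp only [List.map_append, List.map_cons, List.map_nil, List.sum_append,
      List.sum_cons, List.sum_nil, Nat.add_zero]
  rw [e3]
  omega

lemma pvW2_eq (os : List Nat) (i : Nat) :
    pvW2 os i ((pvW os (i - 1) : Nat) : Int) = ((pvW os i : Nat) : Int) := by
  unfold pvW2
  by_cases h11 : 11 ≤ i
  · have h1 : 1 ≤ i := by omega
    rw [if_pos h1, if_pos h11]
    have e1 : (i : Int) - 1 = ((i - 1 : Nat) : Int) := by omega
    have e2 : (i : Int) - 11 = ((i - 11 : Nat) : Int) := by omega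
    rw [e1, e2, PySem.List.pyGetD_natCast, PySem.List.pyGetD_natCast]
    have := pvW_succ_big os i h11
    omega
  · by_cases h1 : 1 ≤ i
    · rw [if_pos h1, if_neg h11]
      have e1 : (i : Int) - 1 = ((i - 1 : Nat) : Int) := by omega
      rw [e1, PySem.List.pyGetD_natCast]
      have := pvW_succ_small os i h1 (by omega)
      omega
    · rw [if_neg h1, if_neg h11]
      have e0 : i = 0 := by omega
      subst e0
      simp
lemma pvSingleRest_length : pvSingleRest.length = 52 := by decide

-- B's new element is A's rewrite
lemma pvNewB_eq (s : String) (nt : Int) (n : Nat) :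
    pvNewB s nt ((n : Nat) : Int) = pvRewriteA s nt (min n (pvSingleRest.length - 1)) := by
  unfold pvNewB pvRewriteA
  have h : min ((n : Nat) : Int) ((pvSingleRest.length : Int) - 1)
      = ((min n (pvSingleRest.length - 1) : Nat) : Int) := by
    rw [pvSingleRest_length]; omega
  rw [h, PySem.List.pyGet?_natCast, List.getD_eq_getElem?_getD]

-- B's loop computes pvProc
lemma pvLoopB_eq (nt : Int) (xs : List String) : ∀ (d i : Nat) (out : List String),
    xs.length - i = d →
    pvLoopB nt (List.replicate nt.toNat '0') (xs.map pvOnes) xs i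
        ((pvW (xs.map pvOnes) (i - 1) : Nat) : Int) out
      = out ++ pvProc nt xs i := by
  intro d
  induction d with
  | zero =>
    intro i out hd
    rw [pvLoopB_neg nt _ _ xs i _ out (by omega), pvProc_neg nt xs i (by omega), List.append_nil]
  | succ d ih =>
    intro i out hd
    have h : i < xs.length := by omega
    rw [pvLoopB_pos nt _ _ xs i _ out h, pvW2_eq]
    have ih' : ∀ out2 : List String,
        pvLoopB nt (List.replicate nt.toNat '0') (xs.map pvOnes) xs (i + 1)
          ((pvW (xs.map pvOnes) i : Nat) : Int) out2 = out2 ++ pvProc nt xs (i + 1) := by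
      intro out2
      have h2 := ih (i + 1) out2 (by omega)
      rwa [Nat.add_sub_cancel] at h2
    by_cases hr : PySem.List.slice (xs[i]'h).toList (some 1) none = List.replicate nt.toNat '0'
    · rw [if_pos hr, ih', pvNewB_eq]
      rw [pvProc_pos nt xs i h, if_pos hr]
      simp
    · rw [if_neg hr, ih']
      rw [pvProc_pos nt xs i h, if_neg hr]
      simp

-- ===== VERDICT (by name: the statement is the Claim_ definition above) =====
theorem modify_chord_rests_spec : Claim_equal_modify_chord_rests := by
  intro cs _ _
  unfold Spec_modify_chord_rests
  simp only [modify_chord_rests, modify_chord_rests_alt]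
  congr 1
  set chords := (PySem.Str.split? (PySem.Str.replace cs "2" "0") " ").getD [] with hch
  set nt : Int := (((PySem.List.pyGet? chords 0).getD "").toList.length : Int) - 1 with hnt
  have hA := pvLoopA_eq nt chords.length 0 chords (by omega)
  have hB := pvLoopB_eq nt chords chords.length 0 ([] : List String) (by omega)
  simp only [Nat.zero_sub, pvW_zero, Nat.cast_zero, List.nil_append] at hB
  rw [hA, hB]
  simp
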